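-- pv_equiv track=rewrite | github.com/Yijia-Liu/test_1 | replace.py | replace_characters
-- ===== SOURCE A (Python) =====
-- def replace_characters(sentence):
--     replacements = {
--         'a': 'а',   #0430
--         'b': 'Ꮟ',   #13CF
--         'c': '∁',   #2201
--         'd': 'ԁ',   #0501
--         'e': 'е',   #0435
--         'f': 'ƒ',   #0192
--         'g': 'ց',   #0261
--         'h': 'һ',   #04BB
--         'i': 'Ꭵ',    #13A5
--         'j': 'ϳ',   #03F3
--         'k': '𝑘',   #D835
--         'l': 'ا',   #0627
--         'n': 'ո',   #0578
--         'm': 'rn',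
--         'o': '𐓪',   #D801
--         'p': 'ⲣ',   #2CA3
--         'q': 'ԛ',   #051B
--         'r': 'г',   #0433
--         's': 'ꮪ',   #ABAA
--         't': 'ʈ',   #0288
--         'u': 'ս',   #057D
--         'v': 'ν',   #03BD
--         'w': 'ꮃ',   #AB83
--         'x': 'х',   #0445
--         'y': 'у',   #0443
--         'z': 'ꮓ'    #AB93
--     }
--
--     for old, new in replacements.items():
--         sentence = sentence.replace(old, new)
--
--     return sentence
-- ===== SOURCE B (Python) =====
-- def replace_characters(sentence):
--     # Arithmetic indexing instead of a mapping: glyphs in alphabetical order,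
--     # selected by ord(c) - 97 in a single accumulator loop; 'm' holds the
--     # already-cascaded result of A's sequential passes ('гn').
--     glyphs = ('а', 'Ꮟ', '∁', 'ԁ', 'е', 'ƒ', 'ց', 'һ', 'Ꭵ', 'ϳ', '𝑘', 'ا',
--               'гn', 'ո', '𐓪', 'ⲣ', 'ԛ', 'г', 'ꮪ', 'ʈ', 'ս', 'ν', 'ꮃ', 'х',
--               'у', 'ꮓ')
--     out = []
--     for c in sentence:
--         k = ord(c) - 97
--         out.append(glyphs[k] if 0 <= k < 26 else c)
--     return ''.join(out)
-- ===== Notes on version B (the rewrite author's own statement) =====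
-- stated objective: alternative
-- what changed: A makes 26 sequential whole-string replace passes (whose order makes 'm' cascade to 'гn'); B keeps no mapping at all: a tuple of glyphs in alphabetical order is indexed arithmetically by ord(c)-97 in one accumulator loop over the characters, joined at the end.
import Mathlib
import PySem

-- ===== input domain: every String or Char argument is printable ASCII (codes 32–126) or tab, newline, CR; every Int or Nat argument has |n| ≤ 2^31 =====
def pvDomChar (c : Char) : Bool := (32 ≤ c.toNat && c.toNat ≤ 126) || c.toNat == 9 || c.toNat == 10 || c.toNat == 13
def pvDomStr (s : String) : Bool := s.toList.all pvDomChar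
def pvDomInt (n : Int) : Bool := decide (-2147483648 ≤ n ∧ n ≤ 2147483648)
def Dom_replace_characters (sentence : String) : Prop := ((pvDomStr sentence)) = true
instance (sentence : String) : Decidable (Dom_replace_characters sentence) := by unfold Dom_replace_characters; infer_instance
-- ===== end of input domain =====

-- B replaces A's 26 sequential whole-string replace passes by arithmetic indexing
-- (ord(c)-97) into an alphabetically ordered glyph tuple, in one accumulator loop.

-- ===== PORT A =====
def aReplacements : List (String × String) :=
  [("a", "а"), ("b", "Ꮟ"), ("c", "∁"), ("d", "ԁ"), ("e", "е"), ("f", "ƒ"), ("g", "ց"), ("h", "һ"), ("i", "Ꭵ"), ("j", "ϳ"), ("k", "𝑘"), ("l", "ا"), ("n", "ո"), ("m", "rn"), ("o", "𐓪"), ("p", "ⲣ"), ("q", "ԛ"), ("r", "г"), ("s", "ꮪ"), ("t", "ʈ"), ("u", "ս"), ("v", "ν"), ("w", "ꮃ"), ("x", "х"), ("y", "у"), ("z", "ꮓ")]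

def replace_characters (sentence : String) : String :=
  aReplacements.foldl (fun s p => PySem.Str.replace s p.1 p.2) sentence

-- ===== PORT B =====
def bGlyphs : List String :=
  ["а", "Ꮟ", "∁", "ԁ", "е", "ƒ", "ց", "һ", "Ꭵ", "ϳ", "𝑘", "ا",
   "гn", "ո", "𐓪", "ⲣ", "ԛ", "г", "ꮪ", "ʈ", "ս", "ν", "ꮃ", "х",
   "у", "ꮓ"]

-- glyphs[k] is guarded by 0 ≤ k < 26, so the Python indexing never raises;
-- the getD default is unreachable.
def replace_characters_alt (sentence : String) : String :=
  PySem.Str.join ""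
    (sentence.toList.foldl
      (fun out c =>
        let k : Int := (c.toNat : Int) - 97
        out ++ [if 0 ≤ k ∧ k < 26 then (PySem.List.pyGet? bGlyphs k).getD "" else String.ofList [c]])
      [])

-- ===== PRECONDITION & SPEC =====
def Spec_replace_characters (sentence : String) (out : String) : Prop := out = replace_characters_alt sentence
instance (sentence : String) (out : String) : Decidable (Spec_replace_characters sentence out) := by unfold Spec_replace_characters; infer_instance

-- ===== CLAIM (what is proved, stated in full; the proofs are below) =====
def Claim_equal_replace_characters : Prop := ∀ (sentence : String), Dom_replace_characters sentence → Spec_replace_characters sentence (replace_characters sentence)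

-- ===== LEMMAS AND PROOFS =====

-- A's cascade of replaces, on the List Char side (proof-only helper).
def chainFrom (ps : List (List Char × List Char)) (l : List Char) : List Char :=
  ps.foldl (fun s p => PySem.Chars.replace s p.1 p.2) l

-- What B appends for one character (proof-only helper).
def charOut (c : Char) : String :=
  let k : Int := (c.toNat : Int) - 97
  if 0 ≤ k ∧ k < 26 then (PySem.List.pyGet? bGlyphs k).getD "" else String.ofList [c]

-- aReplacements with both components as character lists.
def aPairsL : List (List Char × List Char) :=
  [(['a'], ['а']),
   (['b'], ['Ꮟ']),
   (['c'], ['∁']),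
   (['d'], ['ԁ']),
   (['e'], ['е']),
   (['f'], ['ƒ']),
   (['g'], ['ց']),
   (['h'], ['һ']),
   (['i'], ['Ꭵ']),
   (['j'], ['ϳ']),
   (['k'], ['𝑘']),
   (['l'], ['ا']),
   (['n'], ['ո']),
   (['m'], ['r', 'n']),
   (['o'], ['𐓪']),
   (['p'], ['ⲣ']),
   (['q'], ['ԛ']),
   (['r'], ['г']),
   (['s'], ['ꮪ']),
   (['t'], ['ʈ']),
   (['u'], ['ս']),
   (['v'], ['ν']),
   (['w'], ['ꮃ']),
   (['x'], ['х']),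
   (['y'], ['у']),
   (['z'], ['ꮓ'])]

-- Python str.replace with a single-character pattern substitutes character-wise.
theorem replace_single_char (o : Char) (new s : List Char) :
    PySem.Chars.replace s [o] new = s.flatMap (fun c => if c = o then new else [c]) := by
  have go1 : ∀ (l acc : List Char), PySem.Chars.replace.go [o] new l.length l acc
      = acc.reverse ++ l.flatMap (fun c => if c = o then new else [c]) := by
    intro l
    induction l with
    | nil => intro acc; simp [PySem.Chars.replace.go]
    | cons c t ih =>
      intro acc
      rw [List.length_cons, PySem.Chars.replace.go]
      by_cases h : c = o
      · subst h
        simp [List.isPrefixOf, ih]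
      · have hp : ([o].isPrefixOf (c :: t)) = false := by
          simp [List.isPrefixOf]; exact fun e => h e.symm
        simp [hp, ih, h]
  simp [PySem.Chars.replace, go1]

-- ''.join is concatenation.
theorem join_empty_sep (parts : List (List Char)) :
    PySem.Chars.join [] parts = parts.flatten := by
  simp only [PySem.Chars.join, List.intercalate]
  induction parts with
  | nil => rfl
  | cons a t ih => cases t <;> simp_all [List.intersperse]

-- When every pattern is a single character, the cascade distributes over ++.
theorem chainFrom_append (ps : List (List Char × List Char))
    (h : ∀ p ∈ ps, ∃ o, p.1 = [o]) (l1 l2 : List Char) :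
    chainFrom ps (l1 ++ l2) = chainFrom ps l1 ++ chainFrom ps l2 := by
  induction ps generalizing l1 l2 with
  | nil => rfl
  | cons p t ih =>
    obtain ⟨o, ho⟩ := h p List.mem_cons_self
    simp only [chainFrom, List.foldl_cons, ho, replace_single_char, List.flatMap_append]
    exact ih (fun q hq => h q (List.mem_cons_of_mem _ hq)) _ _

theorem aPairsL_singletons : ∀ p ∈ aPairsL, ∃ o, p.1 = [o] := by
  intro p hp
  simp only [aPairsL, List.mem_cons, List.not_mem_nil, or_false] at hp
  rcases hp with rfl|rfl|rfl|rfl|rfl|rfl|rfl|rfl|rfl|rfl|rfl|rfl|rfl|rfl|rfl|rfl|rfl|rfl|rfl|rfl|rfl|rfl|rfl|rfl|rfl|rfl <;> exact ⟨_, rfl⟩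

-- The cascade acts character by character.
theorem chainFrom_flatMap (l : List Char) :
    chainFrom aPairsL l = l.flatMap (fun c => chainFrom aPairsL [c]) := by
  induction l with
  | nil => rfl
  | cons c t ih =>
    have : (c :: t) = [c] ++ t := rfl
    rw [this, chainFrom_append aPairsL aPairsL_singletons, ih, List.flatMap_append]
    simp

-- B's accumulator loop is a map.
theorem foldl_append_map (f : Char → String) :
    ∀ (l : List Char) (acc : List String),
      l.foldl (fun out c => out ++ [f c]) acc = acc ++ l.map f := by
  intro l
  induction l with
  | nil => intro acc; simp
  | cons c t ih => intro acc; simp [ih]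

-- A nat code in 97..122 forces the character to be a lowercase letter.
theorem code_mem_letters (c : Char) (h1 : 97 ≤ c.toNat) (h2 : c.toNat ≤ 122) :
    c ∈ (['a', 'b', 'c', 'd', 'e', 'f', 'g', 'h', 'i', 'j', 'k', 'l', 'n', 'm', 'o', 'p', 'q', 'r', 's', 't', 'u', 'v', 'w', 'x', 'y', 'z'] : List Char) := by
  rw [← Char.ofNat_toNat c]
  generalize c.toNat = n at h1 h2 ⊢
  interval_cases n <;> decide

-- On a single character the cascade is exactly B's per-character output.
set_option maxHeartbeats 1000000 in
theorem perchar (c : Char) :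
    chainFrom aPairsL [c] = (charOut c).toList := by
  by_cases hc : c ∈ (['a', 'b', 'c', 'd', 'e', 'f', 'g', 'h', 'i', 'j', 'k', 'l', 'n', 'm', 'o', 'p', 'q', 'r', 's', 't', 'u', 'v', 'w', 'x', 'y', 'z'] : List Char)
  · fin_cases hc <;> decide
  · have hk : ¬ (0 ≤ ((c.toNat : Int) - 97) ∧ ((c.toNat : Int) - 97) < 26) := by
      rintro ⟨hl, hr⟩
      exact hc (code_mem_letters c (by omega) (by omega))
    have q0 : ¬ (c = 'a') := fun e => hc (by rw [e]; decide)
    have q1 : ¬ (c = 'b') := fun e => hc (by rw [e]; decide)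
    have q2 : ¬ (c = 'c') := fun e => hc (by rw [e]; decide)
    have q3 : ¬ (c = 'd') := fun e => hc (by rw [e]; decide)
    have q4 : ¬ (c = 'e') := fun e => hc (by rw [e]; decide)
    have q5 : ¬ (c = 'f') := fun e => hc (by rw [e]; decide)
    have q6 : ¬ (c = 'g') := fun e => hc (by rw [e]; decide)
    have q7 : ¬ (c = 'h') := fun e => hc (by rw [e]; decide)
    have q8 : ¬ (c = 'i') := fun e => hc (by rw [e]; decide)
    have q9 : ¬ (c = 'j') := fun e => hc (by rw [e]; decide)
    have q10 : ¬ (c = 'k') := fun e => hc (by rw [e]; decide)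
    have q11 : ¬ (c = 'l') := fun e => hc (by rw [e]; decide)
    have q12 : ¬ (c = 'n') := fun e => hc (by rw [e]; decide)
    have q13 : ¬ (c = 'm') := fun e => hc (by rw [e]; decide)
    have q14 : ¬ (c = 'o') := fun e => hc (by rw [e]; decide)
    have q15 : ¬ (c = 'p') := fun e => hc (by rw [e]; decide)
    have q16 : ¬ (c = 'q') := fun e => hc (by rw [e]; decide)
    have q17 : ¬ (c = 'r') := fun e => hc (by rw [e]; decide)
    have q18 : ¬ (c = 's') := fun e => hc (by rw [e]; decide)
    have q19 : ¬ (c = 't') := fun e => hc (by rw [e]; decide)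
    have q20 : ¬ (c = 'u') := fun e => hc (by rw [e]; decide)
    have q21 : ¬ (c = 'v') := fun e => hc (by rw [e]; decide)
    have q22 : ¬ (c = 'w') := fun e => hc (by rw [e]; decide)
    have q23 : ¬ (c = 'x') := fun e => hc (by rw [e]; decide)
    have q24 : ¬ (c = 'y') := fun e => hc (by rw [e]; decide)
    have q25 : ¬ (c = 'z') := fun e => hc (by rw [e]; decide)
    have hco : charOut c = String.ofList [c] := by
      simp only [charOut]; rw [if_neg hk]
    rw [hco]
    simp [chainFrom, aPairsL, replace_single_char,
          q0, q1, q2, q3, q4, q5, q6, q7, q8, q9, q10, q11, q12, q13, q14, q15, q16, q17, q18, q19, q20, q21, q22, q23, q24, q25]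

-- Port A's result, moved to the List Char side.
theorem aToList (s : String) :
    (replace_characters s).toList = chainFrom aPairsL s.toList := by
  simp only [replace_characters, aReplacements, List.foldl_cons, List.foldl_nil,
    PySem.Str.toList_replace, chainFrom, aPairsL,
    show ("a" : String).toList = ['a'] from (by decide),
    show ("b" : String).toList = ['b'] from (by decide),
    show ("c" : String).toList = ['c'] from (by decide),
    show ("d" : String).toList = ['d'] from (by decide),
    show ("e" : String).toList = ['e'] from (by decide),
    show ("f" : String).toList = ['f'] from (by decide),
    show ("g" : String).toList = ['g'] from (by decide),
    show ("h" : String).toList = ['h'] from (by decide),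
    show ("i" : String).toList = ['i'] from (by decide),
    show ("j" : String).toList = ['j'] from (by decide),
    show ("k" : String).toList = ['k'] from (by decide),
    show ("l" : String).toList = ['l'] from (by decide),
    show ("m" : String).toList = ['m'] from (by decide),
    show ("n" : String).toList = ['n'] from (by decide),
    show ("o" : String).toList = ['o'] from (by decide),
    show ("p" : String).toList = ['p'] from (by decide),
    show ("q" : String).toList = ['q'] from (by decide),
    show ("r" : String).toList = ['r'] from (by decide),
    show ("rn" : String).toList = ['r', 'n'] from (by decide),
    show ("s" : String).toList = ['s'] from (by decide),
    show ("t" : String).toList = ['t'] from (by decide),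
    show ("u" : String).toList = ['u'] from (by decide),
    show ("v" : String).toList = ['v'] from (by decide),
    show ("w" : String).toList = ['w'] from (by decide),
    show ("x" : String).toList = ['x'] from (by decide),
    show ("y" : String).toList = ['y'] from (by decide),
    show ("z" : String).toList = ['z'] from (by decide),
    show ("ƒ" : String).toList = ['ƒ'] from (by decide),
    show ("ʈ" : String).toList = ['ʈ'] from (by decide),
    show ("ν" : String).toList = ['ν'] from (by decide),
    show ("ϳ" : String).toList = ['ϳ'] from (by decide),
    show ("а" : String).toList = ['а'] from (by decide),
    show ("г" : String).toList = ['г'] from (by decide),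
    show ("е" : String).toList = ['е'] from (by decide),
    show ("у" : String).toList = ['у'] from (by decide),
    show ("х" : String).toList = ['х'] from (by decide),
    show ("һ" : String).toList = ['һ'] from (by decide),
    show ("ԁ" : String).toList = ['ԁ'] from (by decide),
    show ("ԛ" : String).toList = ['ԛ'] from (by decide),
    show ("ո" : String).toList = ['ո'] from (by decide),
    show ("ս" : String).toList = ['ս'] from (by decide),
    show ("ց" : String).toList = ['ց'] from (by decide),
    show ("ا" : String).toList = ['ا'] from (by decide),
    show ("Ꭵ" : String).toList = ['Ꭵ'] from (by decide),
    show ("Ꮟ" : String).toList = ['Ꮟ'] from (by decide),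
    show ("∁" : String).toList = ['∁'] from (by decide),
    show ("ⲣ" : String).toList = ['ⲣ'] from (by decide),
    show ("ꮃ" : String).toList = ['ꮃ'] from (by decide),
    show ("ꮓ" : String).toList = ['ꮓ'] from (by decide),
    show ("ꮪ" : String).toList = ['ꮪ'] from (by decide),
    show ("𐓪" : String).toList = ['𐓪'] from (by decide),
    show ("𝑘" : String).toList = ['𝑘'] from (by decide),
    ]

-- ===== VERDICT (by name: the statement is the Claim_ definition above) =====
theorem replace_characters_spec : Claim_equal_replace_characters := by
  intro sentence _
  unfold Spec_replace_characters
  apply String.toList_injective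
  rw [aToList, chainFrom_flatMap]
  simp only [replace_characters_alt]
  rw [show (fun (out : List String) (c : Char) =>
        out ++ [if 0 ≤ ((c.toNat : Int) - 97) ∧ ((c.toNat : Int) - 97) < 26 then
          (PySem.List.pyGet? bGlyphs ((c.toNat : Int) - 97)).getD "" else String.ofList [c]])
      = (fun out c => out ++ [charOut c]) from rfl]
  rw [foldl_append_map charOut sentence.toList []]
  simp only [PySem.Str.toList_join, show ("" : String).toList = [] from rfl,
    List.map_map, List.nil_append, join_empty_sep, ← List.flatMap_def]
  exact List.flatMap_congr (fun c _ => perchar c)
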